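-- pv_equiv track=rewrite | github.com/RenzoGior/uba.estudios | Algoritmo1/ejercicios/ejercicios_6/ejercicio_6_3.py | digitos_s
-- ===== SOURCE A (Python) =====
-- def digitos_s(s: str, num: int) -> str:
--     n = ("1","2","3","4","5","6","7","8","9","0")
--     cadena = ""
--     contador = 0
--     for i in s:
--         if i in n and contador < num:
--             cadena += "X"
--             contador += 1
--         else:
--             cadena += i
--     return cadena
-- ===== SOURCE B (Python) =====
-- def digitos_s(s: str, num: int) -> str:
--     digits = "0123456789"
--     j = 0
--     k = num
--     for c in s:
--         if k <= 0:
--             break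
--         j += 1
--         if c in digits:
--             k -= 1
--     return ''.join('X' if c in digits else c for c in s[:j]) + s[j:]
-- ===== Notes on version B (the rewrite author's own statement) =====
-- stated objective: faster
-- what changed: B first scans only to find the cutoff index just past the num-th digit, then builds the result as a single join over the masked prefix plus the untouched suffix slice, instead of A's counter-driven loop that appends every character to a growing string.
import Mathlib
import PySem

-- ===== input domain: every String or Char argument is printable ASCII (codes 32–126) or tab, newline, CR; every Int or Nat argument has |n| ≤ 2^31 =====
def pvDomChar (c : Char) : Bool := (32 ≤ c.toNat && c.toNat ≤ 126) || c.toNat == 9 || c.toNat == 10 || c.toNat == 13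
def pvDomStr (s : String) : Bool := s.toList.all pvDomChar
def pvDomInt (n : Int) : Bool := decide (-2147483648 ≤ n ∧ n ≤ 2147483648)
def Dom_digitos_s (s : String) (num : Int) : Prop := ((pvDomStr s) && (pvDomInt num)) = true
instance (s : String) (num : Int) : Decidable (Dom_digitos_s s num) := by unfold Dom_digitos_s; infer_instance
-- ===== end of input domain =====

-- B finds the cutoff index past the num-th digit, then masks digits in the prefix and appends the suffix unchanged (alternative decomposition of A's single counter loop).


-- ===== PORT A =====
-- A's digit tuple ("1",…,"9","0"); 'i in n' on a 1-char string is char membership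
def pvA_n : List Char := ['1','2','3','4','5','6','7','8','9','0']

def digitos_s (s : String) (num : Int) : String :=
  let r := s.toList.foldl
    (fun (st : List Char × Int) i =>
      if i ∈ pvA_n ∧ st.2 < num then (st.1 ++ ['X'], st.2 + 1) else (st.1 ++ [i], st.2))
    ([], 0)
  String.ofList r.1

-- ===== PORT B =====
def pvB_digits : List Char := ['0','1','2','3','4','5','6','7','8','9']

-- first pass of B: index just past the num-th digit (breaks when k ≤ 0)
def pvB_cutoff : List Char → Int → Nat
  | [], _ => 0
  | c :: rest, k => if k ≤ 0 then 0 else 1 + pvB_cutoff rest (if c ∈ pvB_digits then k - 1 else k)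

def digitos_s_alt (s : String) (num : Int) : String :=
  let cs := s.toList
  let j := pvB_cutoff cs num
  String.ofList ((cs.take j).map (fun c => if c ∈ pvB_digits then 'X' else c) ++ cs.drop j)

-- ===== PRECONDITION & SPEC =====
def Spec_digitos_s (s : String) (num : Int) (out : String) : Prop := out = digitos_s_alt s num
instance (s : String) (num : Int) (out : String) : Decidable (Spec_digitos_s s num out) := by unfold Spec_digitos_s; infer_instance

-- ===== CLAIM (what is proved, stated in full; the proofs are below) =====
def Claim_equal_digitos_s : Prop := ∀ (s : String) (num : Int), Dom_digitos_s s num → Spec_digitos_s s num (digitos_s s num)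

-- ===== LEMMAS AND PROOFS =====

-- accumulator-free form of A's loop
def pvARec (num : Int) : List Char → Int → List Char
  | [], _ => []
  | c :: rest, cont =>
      if c ∈ pvA_n ∧ cont < num then 'X' :: pvARec num rest (cont + 1) else c :: pvARec num rest cont

lemma pvDigits_eq (c : Char) : (c ∈ pvA_n) ↔ (c ∈ pvB_digits) := by
  simp [pvA_n, pvB_digits]; tauto

lemma pvFoldl_eq_aRec (num : Int) (cs : List Char) (acc : List Char) (cont : Int) :
    (cs.foldl
      (fun (st : List Char × Int) i =>
        if i ∈ pvA_n ∧ st.2 < num then (st.1 ++ ['X'], st.2 + 1) else (st.1 ++ [i], st.2))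
      (acc, cont)).1 = acc ++ pvARec num cs cont := by
  induction cs generalizing acc cont with
  | nil => simp [pvARec]
  | cons c rest ih =>
      simp only [List.foldl_cons, pvARec]
      by_cases h : c ∈ pvA_n ∧ cont < num
      · simp [h, ih]
      · simp [h, ih]

lemma pvARec_of_ge (num : Int) (cs : List Char) (cont : Int) (h : num ≤ cont) :
    pvARec num cs cont = cs := by
  induction cs generalizing cont with
  | nil => rfl
  | cons c rest ih =>
      have : ¬ (c ∈ pvA_n ∧ cont < num) := by rintro ⟨_, hlt⟩; omega
      simp [pvARec, this, ih cont h]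

lemma pvARec_eq_alt (num : Int) (cs : List Char) (cont : Int) :
    pvARec num cs cont =
      (cs.take (pvB_cutoff cs (num - cont))).map (fun c => if c ∈ pvB_digits then 'X' else c)
        ++ cs.drop (pvB_cutoff cs (num - cont)) := by
  induction cs generalizing cont with
  | nil => rfl
  | cons c rest ih =>
      by_cases hk : num - cont ≤ 0
      · have hcut : pvB_cutoff (c :: rest) (num - cont) = 0 := by simp [pvB_cutoff, hk]
        have hlt : ¬ (c ∈ pvA_n ∧ cont < num) := by rintro ⟨_, h⟩; omega
        simp [hcut, pvARec, hlt, pvARec_of_ge num rest cont (by omega)]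
      · have hcut : pvB_cutoff (c :: rest) (num - cont)
            = 1 + pvB_cutoff rest (if c ∈ pvB_digits then (num - cont) - 1 else num - cont) := by
          simp [pvB_cutoff, hk]
        by_cases hd : c ∈ pvB_digits
        · have hA : c ∈ pvA_n ∧ cont < num := ⟨(pvDigits_eq c).mpr hd, by omega⟩
          have : num - (cont + 1) = (num - cont) - 1 := by omega
          simp [pvARec, hA, hcut, hd, ih (cont + 1), this, List.take_succ_cons, List.drop_succ_cons,
            Nat.add_comm 1]
        · have hA : ¬ (c ∈ pvA_n ∧ cont < num) := by
            rintro ⟨hm, _⟩; exact hd ((pvDigits_eq c).mp hm)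
          simp [pvARec, hA, hcut, hd, ih cont, List.take_succ_cons, List.drop_succ_cons,
            Nat.add_comm 1]

-- ===== VERDICT (by name: the statement is the Claim_ definition above) =====
theorem digitos_s_spec : Claim_equal_digitos_s := by
  intro s num _
  unfold Spec_digitos_s digitos_s digitos_s_alt
  simp only []
  rw [pvFoldl_eq_aRec num s.toList [] 0]
  rw [pvARec_eq_alt num s.toList 0]
  simp
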